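-- pv_equiv track=rewrite | github.com/timer-ghazi/Elements-Table | periodic_table_demo.py | handle_move
-- ===== SOURCE A (Python) =====
-- TABLE_POSITIONS = {
--     (0, 0): "H",  (0, 17): "He",
--
--     (1, 0): "Li", (1, 1): "Be",          (1, 12): "B", (1, 13): "C",
--     (1, 14): "N", (1, 15): "O", (1, 16): "F", (1, 17): "Ne",
--
--     (2, 0): "Na", (2, 1): "Mg",          (2, 12): "Al", (2, 13): "Si",
--     (2, 14): "P", (2, 15): "S", (2, 16): "Cl", (2, 17): "Ar",
--
--     (3, 0): "K",  (3, 1): "Ca", (3, 2): "Sc", (3, 3): "Ti", (3, 4): "V",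
--                   (3, 5): "Cr", (3, 6): "Mn", (3, 7): "Fe", (3, 8): "Co",
--                   (3, 9): "Ni", (3,10): "Cu", (3,11): "Zn",
--                   (3,12): "Ga", (3,13): "Ge", (3,14): "As", (3,15): "Se",
--                   (3,16): "Br", (3,17): "Kr",
--
--     (4, 0): "Rb", (4, 1): "Sr", (4, 2): "Y",  (4, 3): "Zr", (4, 4): "Nb",
--                   (4, 5): "Mo", (4, 6): "Tc", (4, 7): "Ru", (4, 8): "Rh",
--                   (4, 9): "Pd", (4,10): "Ag", (4,11): "Cd",
--                   (4,12): "In", (4,13): "Sn", (4,14): "Sb", (4,15): "Te",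
--                   (4,16): "I",  (4,17): "Xe",
--
--     (5, 0): "Cs", (5, 1): "Ba", (5, 2): "Ln",  (5, 3): "Hf", (5, 4): "Ta",
--                   (5, 5): "W",  (5, 6): "Re",  (5, 7): "Os", (5, 8): "Ir",
--                   (5, 9): "Pt", (5,10): "Au", (5,11): "Hg",
--                   (5,12): "Tl", (5,13): "Pb", (5,14): "Bi", (5,15): "Po",
--                   (5,16): "At", (5,17): "Rn",
--
--     (6, 0): "Fr", (6, 1): "Ra", (6, 2): "An",
-- }
--
-- MAX_ROW = max(r for (r, c) in TABLE_POSITIONS.keys())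
--
-- MAX_COL = max(c for (r, c) in TABLE_POSITIONS.keys())
--
-- def handle_move(current_r, current_c, direction):
--     """
--     Move through TABLE_POSITIONS skipping empty spaces.
--     direction is one of: 'left', 'right', 'up', 'down'.
--     We'll find the next valid (r, c) with an existing element.
--     If none is found, we return the same (r, c).
--     """
--     if direction == 'left':
--         # find the largest col < current_c for which (current_r, col) in TABLE_POSITIONS
--         for col in range(current_c - 1, -1, -1):
--             if (current_r, col) in TABLE_POSITIONS:
--                 return (current_r, col)
--         return (current_r, current_c)
--
--     elif direction == 'right':
--         # find the smallest col > current_c for which (current_r, col) in TABLE_POSITIONS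
--         for col in range(current_c + 1, MAX_COL+1):
--             if (current_r, col) in TABLE_POSITIONS:
--                 return (current_r, col)
--         return (current_r, current_c)
--
--     elif direction == 'up':
--         # find the largest row < current_r for which (row, current_c) in TABLE_POSITIONS
--         for row in range(current_r - 1, -1, -1):
--             if (row, current_c) in TABLE_POSITIONS:
--                 return (row, current_c)
--         return (current_r, current_c)
--
--     elif direction == 'down':
--         # find the smallest row > current_r for which (row, current_c) in TABLE_POSITIONS
--         for row in range(current_r + 1, MAX_ROW+1):
--             if (row, current_c) in TABLE_POSITIONS:
--                 return (row, current_c)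
--         return (current_r, current_c)
--
--     else:
--         return (current_r, current_c)
-- ===== SOURCE B (Python) =====
-- # Re-implementation: instead of scanning grid coordinates one by one,
-- # precompute per-row and per-column sorted occupancy indices once and pick the
-- # neighbour from those short lists.
--
-- TABLE_POSITIONS = {
--     (0, 0): "H",  (0, 17): "He",
--
--     (1, 0): "Li", (1, 1): "Be",          (1, 12): "B", (1, 13): "C",
--     (1, 14): "N", (1, 15): "O", (1, 16): "F", (1, 17): "Ne",
--
--     (2, 0): "Na", (2, 1): "Mg",          (2, 12): "Al", (2, 13): "Si",
--     (2, 14): "P", (2, 15): "S", (2, 16): "Cl", (2, 17): "Ar",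
--
--     (3, 0): "K",  (3, 1): "Ca", (3, 2): "Sc", (3, 3): "Ti", (3, 4): "V",
--                   (3, 5): "Cr", (3, 6): "Mn", (3, 7): "Fe", (3, 8): "Co",
--                   (3, 9): "Ni", (3,10): "Cu", (3,11): "Zn",
--                   (3,12): "Ga", (3,13): "Ge", (3,14): "As", (3,15): "Se",
--                   (3,16): "Br", (3,17): "Kr",
--
--     (4, 0): "Rb", (4, 1): "Sr", (4, 2): "Y",  (4, 3): "Zr", (4, 4): "Nb",
--                   (4, 5): "Mo", (4, 6): "Tc", (4, 7): "Ru", (4, 8): "Rh",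
--                   (4, 9): "Pd", (4,10): "Ag", (4,11): "Cd",
--                   (4,12): "In", (4,13): "Sn", (4,14): "Sb", (4,15): "Te",
--                   (4,16): "I",  (4,17): "Xe",
--
--     (5, 0): "Cs", (5, 1): "Ba", (5, 2): "Ln",  (5, 3): "Hf", (5, 4): "Ta",
--                   (5, 5): "W",  (5, 6): "Re",  (5, 7): "Os", (5, 8): "Ir",
--                   (5, 9): "Pt", (5,10): "Au", (5,11): "Hg",
--                   (5,12): "Tl", (5,13): "Pb", (5,14): "Bi", (5,15): "Po",
--                   (5,16): "At", (5,17): "Rn",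
--
--     (6, 0): "Fr", (6, 1): "Ra", (6, 2): "An",
-- }
--
-- ROW_COLS = {}
-- COL_ROWS = {}
-- for (_r, _c) in TABLE_POSITIONS:
--     ROW_COLS.setdefault(_r, []).append(_c)
--     COL_ROWS.setdefault(_c, []).append(_r)
-- for _v in ROW_COLS.values():
--     _v.sort()
-- for _v in COL_ROWS.values():
--     _v.sort()
--
--
-- def _last_lt(xs, v):
--     """Largest element of the ascending list xs that is < v, else None."""
--     best = None
--     for x in xs:
--         if x < v:
--             best = x
--         else:
--             break
--     return best
--
--
-- def _first_gt(xs, v):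
--     """Smallest element of the ascending list xs that is > v, else None."""
--     for x in xs:
--         if x > v:
--             return x
--     return None
--
--
-- def handle_move(current_r, current_c, direction):
--     if direction == 'left':
--         hit = _last_lt(ROW_COLS.get(current_r, []), current_c)
--         return (current_r, hit) if hit is not None else (current_r, current_c)
--     elif direction == 'right':
--         hit = _first_gt(ROW_COLS.get(current_r, []), current_c)
--         return (current_r, hit) if hit is not None else (current_r, current_c)
--     elif direction == 'up':
--         hit = _last_lt(COL_ROWS.get(current_c, []), current_r)
--         return (hit, current_c) if hit is not None else (current_r, current_c)
--     elif direction == 'down':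
--         hit = _first_gt(COL_ROWS.get(current_c, []), current_r)
--         return (hit, current_c) if hit is not None else (current_r, current_c)
--     else:
--         return (current_r, current_c)
-- ===== Notes on version B (the rewrite author's own statement) =====
-- stated objective: alternative
-- what changed: Replaces A's cell-by-cell scan of grid coordinates with two per-row/per-column sorted occupancy indices precomputed once at module level; each move picks the predecessor/successor from one short list (at most 18 entries) instead of probing the dict coordinate by coordinate.
import Mathlib
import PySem

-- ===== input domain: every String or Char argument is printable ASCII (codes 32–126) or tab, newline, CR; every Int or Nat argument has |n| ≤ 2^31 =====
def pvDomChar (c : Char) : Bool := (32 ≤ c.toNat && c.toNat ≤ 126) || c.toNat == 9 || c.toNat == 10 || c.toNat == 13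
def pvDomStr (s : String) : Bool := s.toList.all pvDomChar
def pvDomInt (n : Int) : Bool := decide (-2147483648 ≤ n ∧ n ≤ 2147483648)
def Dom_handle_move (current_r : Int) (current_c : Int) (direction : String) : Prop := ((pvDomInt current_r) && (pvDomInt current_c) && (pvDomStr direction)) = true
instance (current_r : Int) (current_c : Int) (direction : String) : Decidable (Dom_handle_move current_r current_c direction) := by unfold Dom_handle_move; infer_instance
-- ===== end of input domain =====

-- B replaces A's cell-by-cell scan of grid coordinates with two precomputed
-- per-row / per-column sorted occupancy indices; objective: alternative
-- (each move reads one short occupancy list instead of probing the dict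
-- coordinate by coordinate).

-- ===== PORT A =====

def pvTable : PySem.Dict (Int × Int) String := PySem.Dict.ofList [((0, 0), "H"), ((0, 17), "He"), ((1, 0), "Li"), ((1, 1), "Be"), ((1, 12), "B"), ((1, 13), "C"), ((1, 14), "N"), ((1, 15), "O"), ((1, 16), "F"), ((1, 17), "Ne"), ((2, 0), "Na"), ((2, 1), "Mg"), ((2, 12), "Al"), ((2, 13), "Si"), ((2, 14), "P"), ((2, 15), "S"), ((2, 16), "Cl"), ((2, 17), "Ar"), ((3, 0), "K"), ((3, 1), "Ca"), ((3, 2), "Sc"), ((3, 3), "Ti"), ((3, 4), "V"), ((3, 5), "Cr"), ((3, 6), "Mn"), ((3, 7), "Fe"), ((3, 8), "Co"), ((3, 9), "Ni"), ((3, 10), "Cu"), ((3, 11), "Zn"), ((3, 12), "Ga"), ((3, 13), "Ge"), ((3, 14), "As"), ((3, 15), "Se"), ((3, 16), "Br"), ((3, 17), "Kr"), ((4, 0), "Rb"), ((4, 1), "Sr"), ((4, 2), "Y"), ((4, 3), "Zr"), ((4, 4), "Nb"), ((4, 5), "Mo"), ((4, 6), "Tc"), ((4, 7), "Ru"), ((4,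 8), "Rh"), ((4, 9), "Pd"), ((4, 10), "Ag"), ((4, 11), "Cd"), ((4, 12), "In"), ((4, 13), "Sn"), ((4, 14), "Sb"), ((4, 15), "Te"), ((4, 16), "I"), ((4, 17), "Xe"), ((5, 0), "Cs"), ((5, 1), "Ba"), ((5, 2), "Ln"), ((5, 3), "Hf"), ((5, 4), "Ta"), ((5, 5), "W"), ((5, 6), "Re"), ((5, 7), "Os"), ((5, 8), "Ir"), ((5, 9), "Pt"), ((5, 10), "Au"), ((5, 11), "Hg"), ((5, 12), "Tl"), ((5, 13), "Pb"), ((5, 14), "Bi"), ((5, 15), "Po"), ((5, 16), "At"), ((5, 17), "Rn"), ((6, 0), "Fr"), ((6, 1), "Ra"), ((6, 2), "An")]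

-- max(r for (r, c) in TABLE_POSITIONS.keys()); the table is nonempty, so max? is some and the 0 default is never used
def pvMAX_ROW : Int := (PySem.List.max? ((PySem.Dict.keys pvTable).map (fun k => k.1)) (fun x => x)).getD 0

def pvMAX_COL : Int := (PySem.List.max? ((PySem.Dict.keys pvTable).map (fun k => k.2)) (fun x => x)).getD 0

-- '(r, c) in TABLE_POSITIONS'
def pvMem (r : Int) (c : Int) : Bool := PySem.Dict.contains pvTable (r, c)

-- 'for x in range(start, stop, ±1): if p x: return x' — fuel = the length of the range, early return on the first hit
def pvScan (step : Int) (p : Int → Bool) (x : Int) : Nat → Option Int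
  | 0 => none
  | n + 1 => if p x then some x else pvScan step p (x + step) n

def handle_move (current_r : Int) (current_c : Int) (direction : String) : Int × Int :=
  if direction = "left" then
    match pvScan (-1) (fun col => pvMem current_r col) (current_c - 1) (current_c - 1 - (-1)).toNat with
    | some col => (current_r, col)
    | none => (current_r, current_c)
  else if direction = "right" then
    match pvScan 1 (fun col => pvMem current_r col) (current_c + 1) (pvMAX_COL + 1 - (current_c + 1)).toNat with
    | some col => (current_r, col)
    | none => (current_r, current_c)
  else if direction = "up" then
    match pvScan (-1) (fun row => pvMem row current_c) (current_r - 1) (current_r - 1 - (-1)).toNat with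
    | some row => (row, current_c)
    | none => (current_r, current_c)
  else if direction = "down" then
    match pvScan 1 (fun row => pvMem row current_c) (current_r + 1) (pvMAX_ROW + 1 - (current_r + 1)).toNat with
    | some row => (row, current_c)
    | none => (current_r, current_c)
  else
    (current_r, current_c)

-- ===== PORT B =====

-- the module-level building loop of Source B: ROW_COLS.setdefault(r, []).append(c) etc.
def pvIndexes : PySem.Dict Int (List Int) × PySem.Dict Int (List Int) :=
  (PySem.Dict.keys pvTable).foldl
    (fun d k => (d.1.modify k.1 [] (fun v => v ++ [k.2]), d.2.modify k.2 [] (fun v => v ++ [k.1])))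
    (PySem.Dict.empty, PySem.Dict.empty)

-- 'for v in ROW_COLS.values(): v.sort()'
def pvROW_COLS : PySem.Dict Int (List Int) :=
  PySem.Dict.mk ((pvIndexes.1).items.map (fun p => (p.1, PySem.List.sorted p.2 (fun x => x))))

def pvCOL_ROWS : PySem.Dict Int (List Int) :=
  PySem.Dict.mk ((pvIndexes.2).items.map (fun p => (p.1, PySem.List.sorted p.2 (fun x => x))))

-- _last_lt's loop, with its 'best' accumulator and break
def pvLastLtGo (xs : List Int) (v : Int) (best : Option Int) : Option Int :=
  match xs with
  | [] => best
  | x :: rest => if x < v then pvLastLtGo rest v (some x) else best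

def pvLastLt (xs : List Int) (v : Int) : Option Int := pvLastLtGo xs v none

def pvFirstGt (xs : List Int) (v : Int) : Option Int :=
  match xs with
  | [] => none
  | x :: rest => if x > v then some x else pvFirstGt rest v

def handle_move_alt (current_r : Int) (current_c : Int) (direction : String) : Int × Int :=
  if direction = "left" then
    match pvLastLt (pvROW_COLS.getD current_r []) current_c with
    | some hit => (current_r, hit)
    | none => (current_r, current_c)
  else if direction = "right" then
    match pvFirstGt (pvROW_COLS.getD current_r []) current_c with
    | some hit => (current_r, hit)
    | none => (current_r, current_c)
  else if direction = "up" then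
    match pvLastLt (pvCOL_ROWS.getD current_c []) current_r with
    | some hit => (hit, current_c)
    | none => (current_r, current_c)
  else if direction = "down" then
    match pvFirstGt (pvCOL_ROWS.getD current_c []) current_r with
    | some hit => (hit, current_c)
    | none => (current_r, current_c)
  else
    (current_r, current_c)

-- ===== PRECONDITION & SPEC =====
def Spec_handle_move (current_r : Int) (current_c : Int) (direction : String) (out : Int × Int) : Prop := out = handle_move_alt current_r current_c direction
instance (current_r : Int) (current_c : Int) (direction : String) (out : Int × Int) : Decidable (Spec_handle_move current_r current_c direction out) := by unfold Spec_handle_move; infer_instance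

-- ===== CLAIM (what is proved, stated in full; the proofs are below) =====
def Claim_equal_handle_move : Prop := ∀ (current_r : Int) (current_c : Int) (direction : String), Dom_handle_move current_r current_c direction → Spec_handle_move current_r current_c direction (handle_move current_r current_c direction)

-- ===== LEMMAS AND PROOFS =====

set_option maxRecDepth 40000 in
theorem pvTable_eq : pvTable = PySem.Dict.mk [((0, 0), "H"), ((0, 17), "He"), ((1, 0), "Li"), ((1, 1), "Be"), ((1, 12), "B"), ((1, 13), "C"), ((1, 14), "N"), ((1, 15), "O"), ((1, 16), "F"), ((1, 17), "Ne"), ((2, 0), "Na"), ((2, 1), "Mg"), ((2, 12), "Al"), ((2, 13), "Si"), ((2, 14), "P"), ((2, 15), "S"), ((2, 16), "Cl"), ((2, 17), "Ar"), ((3, 0), "K"), ((3, 1), "Ca"), ((3, 2), "Sc"), ((3, 3), "Ti"), ((3, 4), "V"), ((3, 5), "Cr"), ((3, 6), "Mn"), ((3, 7), "Fe"), ((3, 8), "Co"), ((3, 9), "Ni"), ((3, 10), "Cu"), ((3, 11), "Zn"), ((3, 12), "Ga"), ((3, 13), "Ge"), ((3, 14), "As"), ((3, 15), "Se"), ((3,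 16), "Br"), ((3, 17), "Kr"), ((4, 0), "Rb"), ((4, 1), "Sr"), ((4, 2), "Y"), ((4, 3), "Zr"), ((4, 4), "Nb"), ((4, 5), "Mo"), ((4, 6), "Tc"), ((4, 7), "Ru"), ((4, 8), "Rh"), ((4, 9), "Pd"), ((4, 10), "Ag"), ((4, 11), "Cd"), ((4, 12), "In"), ((4, 13), "Sn"), ((4, 14), "Sb"), ((4, 15), "Te"), ((4, 16), "I"), ((4, 17), "Xe"), ((5, 0), "Cs"), ((5, 1), "Ba"), ((5, 2), "Ln"), ((5, 3), "Hf"), ((5, 4), "Ta"), ((5, 5), "W"), ((5, 6), "Re"), ((5, 7), "Os"), ((5, 8), "Ir"), ((5, 9), "Pt"), ((5, 10), "Au"), ((5, 11), "Hg"), ((5, 12), "Tl"), ((5, 13), "Pb"), ((5, 14), "Bi"), ((5, 15), "Po"), ((5, 16), "At"), ((5, 17), "Rn"), ((6, 0), "Fr"), ((6, 1), "Ra"), ((6, 2), "An")] := by decide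

set_option maxRecDepth 40000 in
theorem pvMAX_ROW_eq : pvMAX_ROW = 6 := by decide

set_option maxRecDepth 40000 in
theorem pvMAX_COL_eq : pvMAX_COL = 17 := by decide

set_option maxRecDepth 40000 in
theorem pvROW_COLS_eq : pvROW_COLS = PySem.Dict.mk [(0, [0, 17]), (1, [0, 1, 12, 13, 14, 15, 16, 17]), (2, [0, 1, 12, 13, 14, 15, 16, 17]), (3, [0, 1, 2, 3, 4, 5, 6, 7, 8, 9, 10, 11, 12, 13, 14, 15, 16, 17]), (4, [0, 1, 2, 3, 4, 5, 6, 7, 8, 9, 10, 11, 12, 13, 14, 15, 16, 17]), (5, [0, 1, 2, 3, 4, 5, 6, 7, 8, 9, 10, 11, 12, 13, 14, 15, 16, 17]), (6, [0, 1, 2])] := by decide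

set_option maxRecDepth 40000 in
theorem pvCOL_ROWS_eq : pvCOL_ROWS = PySem.Dict.mk [(0, [0, 1, 2, 3, 4, 5, 6]), (17, [0, 1, 2, 3, 4, 5]), (1, [1, 2, 3, 4, 5, 6]), (12, [1, 2, 3, 4, 5]), (13, [1, 2, 3, 4, 5]), (14, [1, 2, 3, 4, 5]), (15, [1, 2, 3, 4, 5]), (16, [1, 2, 3, 4, 5]), (2, [3, 4, 5, 6]), (3, [3, 4, 5]), (4, [3, 4, 5]), (5, [3, 4, 5]), (6, [3, 4, 5]), (7, [3, 4, 5]), (8, [3, 4, 5]), (9, [3, 4, 5]), (10, [3, 4, 5]), (11, [3, 4, 5])] := by decide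

-- getD on a literal dict is the default or one of the stored values
theorem pv_getD_nil_or_mem {v : Type} : forall (l : List (Int × v)) (k : Int) (d : v), PySem.Dict.getD (PySem.Dict.mk l) k d = d ∨ PySem.Dict.getD (PySem.Dict.mk l) k d ∈ l.map Prod.snd := by
  intro l
  induction l with
  | nil => intro k d; left; simp [PySem.Dict.getD, PySem.Dict.get?]
  | cons p rest ih =>
    intro k d
    rcases p with ⟨pk, pv⟩
    by_cases h : (pk == k) = true
    · right; simp [PySem.Dict.getD, PySem.Dict.get?_mk_cons, h]
    · rcases ih k d with h' | h'
      · left; simpa [PySem.Dict.getD, PySem.Dict.get?_mk_cons, h] using h'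
      · right; simp [PySem.Dict.getD, PySem.Dict.get?_mk_cons, h]
        right; simpa [PySem.Dict.getD] using h'

theorem pv_row_props (r : Int) : (pvROW_COLS.getD r []).Pairwise (· < ·) ∧ ∀ x ∈ pvROW_COLS.getD r [], 0 ≤ x ∧ x ≤ 17 := by
  rw [pvROW_COLS_eq]
  rcases pv_getD_nil_or_mem _ r [] with h | h
  · rw [h]; simp
  · have hall : ∀ l ∈ [([0, 17] : List Int), [0, 1, 12, 13, 14, 15, 16, 17], [0, 1, 12, 13, 14, 15, 16, 17], [0, 1, 2, 3, 4, 5, 6, 7, 8, 9, 10, 11, 12, 13, 14, 15, 16, 17], [0, 1, 2, 3, 4, 5, 6, 7, 8, 9, 10, 11, 12, 13, 14, 15, 16, 17], [0, 1, 2, 3, 4, 5, 6, 7, 8, 9, 10, 11, 12, 13, 14, 15, 16, 17], [0, 1, 2]], l.Pairwise (· < ·) ∧ ∀ x ∈ l, 0 ≤ x ∧ x ≤ 17 := by decide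
    exact hall _ (by simpa using h)

theorem pv_col_props (c : Int) : (pvCOL_ROWS.getD c []).Pairwise (· < ·) ∧ ∀ x ∈ pvCOL_ROWS.getD c [], 0 ≤ x ∧ x ≤ 6 := by
  rw [pvCOL_ROWS_eq]
  rcases pv_getD_nil_or_mem _ c [] with h | h
  · rw [h]; simp
  · have hall : ∀ l ∈ [([0, 1, 2, 3, 4, 5, 6] : List Int), [0, 1, 2, 3, 4, 5], [1, 2, 3, 4, 5, 6], [1, 2, 3, 4, 5], [1, 2, 3, 4, 5], [1, 2, 3, 4, 5], [1, 2, 3, 4, 5], [1, 2, 3, 4, 5], [3, 4, 5, 6], [3, 4, 5], [3, 4, 5], [3, 4, 5], [3, 4, 5], [3, 4, 5], [3, 4, 5], [3, 4, 5], [3, 4, 5], [3, 4, 5]], l.Pairwise (· < ·) ∧ ∀ x ∈ l, 0 ≤ x ∧ x ≤ 6 := by decide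
    exact hall _ (by simpa using h)

theorem pv_mem_row (r x : Int) : pvMem r x = decide (x ∈ pvROW_COLS.getD r []) := by
  rw [pvROW_COLS_eq]
  by_cases h0 : r = 0
  · subst h0; rw [Bool.eq_iff_iff]; simp [pvMem, pvTable_eq, PySem.Dict.contains_mk, PySem.Dict.getD, PySem.Dict.get?_mk_cons, PySem.Dict.get?]; omega
  by_cases h1 : r = 1
  · subst h1; rw [Bool.eq_iff_iff]; simp [pvMem, pvTable_eq, PySem.Dict.contains_mk, PySem.Dict.getD, PySem.Dict.get?_mk_cons, PySem.Dict.get?]; omega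
  by_cases h2 : r = 2
  · subst h2; rw [Bool.eq_iff_iff]; simp [pvMem, pvTable_eq, PySem.Dict.contains_mk, PySem.Dict.getD, PySem.Dict.get?_mk_cons, PySem.Dict.get?]; omega
  by_cases h3 : r = 3
  · subst h3; rw [Bool.eq_iff_iff]; simp [pvMem, pvTable_eq, PySem.Dict.contains_mk, PySem.Dict.getD, PySem.Dict.get?_mk_cons, PySem.Dict.get?]; omega
  by_cases h4 : r = 4
  · subst h4; rw [Bool.eq_iff_iff]; simp [pvMem, pvTable_eq, PySem.Dict.contains_mk, PySem.Dict.getD, PySem.Dict.get?_mk_cons, PySem.Dict.get?]; omega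
  by_cases h5 : r = 5
  · subst h5; rw [Bool.eq_iff_iff]; simp [pvMem, pvTable_eq, PySem.Dict.contains_mk, PySem.Dict.getD, PySem.Dict.get?_mk_cons, PySem.Dict.get?]; omega
  by_cases h6 : r = 6
  · subst h6; rw [Bool.eq_iff_iff]; simp [pvMem, pvTable_eq, PySem.Dict.contains_mk, PySem.Dict.getD, PySem.Dict.get?_mk_cons, PySem.Dict.get?]; omega
  · rw [Bool.eq_iff_iff]
    have hf : List.find? (fun p => p.1 == r) [((0:Int), ([0, 17]:List Int)), (1, [0, 1, 12, 13, 14, 15, 16, 17]), (2, [0, 1, 12, 13, 14, 15, 16, 17]), (3, [0, 1, 2, 3, 4, 5, 6, 7, 8, 9, 10, 11, 12, 13, 14, 15, 16, 17]), (4, [0, 1, 2, 3, 4, 5, 6, 7, 8, 9, 10, 11, 12, 13, 14, 15, 16, 17]), (5, [0, 1, 2, 3, 4, 5, 6, 7, 8, 9, 10, 11, 12, 13, 14, 15, 16, 17]), (6, [0, 1, 2])] = none := by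
      rw [List.find?_eq_none]
      intro a ha
      fin_cases ha <;> simp <;> omega
    simp [pvMem, pvTable_eq, PySem.Dict.contains_mk, PySem.Dict.getD, PySem.Dict.get?, hf]
    omega


theorem pv_mem_col (c x : Int) : pvMem x c = decide (x ∈ pvCOL_ROWS.getD c []) := by
  rw [pvCOL_ROWS_eq]
  by_cases h0 : c = 0
  · subst h0; rw [Bool.eq_iff_iff]; simp [pvMem, pvTable_eq, PySem.Dict.contains_mk, PySem.Dict.getD, PySem.Dict.get?_mk_cons, PySem.Dict.get?]; omega
  by_cases h1 : c = 1
  · subst h1; rw [Bool.eq_iff_iff]; simp [pvMem, pvTable_eq, PySem.Dict.contains_mk, PySem.Dict.getD, PySem.Dict.get?_mk_cons, PySem.Dict.get?]; omega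
  by_cases h2 : c = 2
  · subst h2; rw [Bool.eq_iff_iff]; simp [pvMem, pvTable_eq, PySem.Dict.contains_mk, PySem.Dict.getD, PySem.Dict.get?_mk_cons, PySem.Dict.get?]; omega
  by_cases h3 : c = 3
  · subst h3; rw [Bool.eq_iff_iff]; simp [pvMem, pvTable_eq, PySem.Dict.contains_mk, PySem.Dict.getD, PySem.Dict.get?_mk_cons, PySem.Dict.get?]; omega
  by_cases h4 : c = 4
  · subst h4; rw [Bool.eq_iff_iff]; simp [pvMem, pvTable_eq, PySem.Dict.contains_mk, PySem.Dict.getD, PySem.Dict.get?_mk_cons, PySem.Dict.get?]; omega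
  by_cases h5 : c = 5
  · subst h5; rw [Bool.eq_iff_iff]; simp [pvMem, pvTable_eq, PySem.Dict.contains_mk, PySem.Dict.getD, PySem.Dict.get?_mk_cons, PySem.Dict.get?]; omega
  by_cases h6 : c = 6
  · subst h6; rw [Bool.eq_iff_iff]; simp [pvMem, pvTable_eq, PySem.Dict.contains_mk, PySem.Dict.getD, PySem.Dict.get?_mk_cons, PySem.Dict.get?]; omega
  by_cases h7 : c = 7
  · subst h7; rw [Bool.eq_iff_iff]; simp [pvMem, pvTable_eq, PySem.Dict.contains_mk, PySem.Dict.getD, PySem.Dict.get?_mk_cons, PySem.Dict.get?]; omega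
  by_cases h8 : c = 8
  · subst h8; rw [Bool.eq_iff_iff]; simp [pvMem, pvTable_eq, PySem.Dict.contains_mk, PySem.Dict.getD, PySem.Dict.get?_mk_cons, PySem.Dict.get?]; omega
  by_cases h9 : c = 9
  · subst h9; rw [Bool.eq_iff_iff]; simp [pvMem, pvTable_eq, PySem.Dict.contains_mk, PySem.Dict.getD, PySem.Dict.get?_mk_cons, PySem.Dict.get?]; omega
  by_cases h10 : c = 10
  · subst h10; rw [Bool.eq_iff_iff]; simp [pvMem, pvTable_eq, PySem.Dict.contains_mk, PySem.Dict.getD, PySem.Dict.get?_mk_cons, PySem.Dict.get?]; omega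
  by_cases h11 : c = 11
  · subst h11; rw [Bool.eq_iff_iff]; simp [pvMem, pvTable_eq, PySem.Dict.contains_mk, PySem.Dict.getD, PySem.Dict.get?_mk_cons, PySem.Dict.get?]; omega
  by_cases h12 : c = 12
  · subst h12; rw [Bool.eq_iff_iff]; simp [pvMem, pvTable_eq, PySem.Dict.contains_mk, PySem.Dict.getD, PySem.Dict.get?_mk_cons, PySem.Dict.get?]; omega
  by_cases h13 : c = 13
  · subst h13; rw [Bool.eq_iff_iff]; simp [pvMem, pvTable_eq, PySem.Dict.contains_mk, PySem.Dict.getD, PySem.Dict.get?_mk_cons, PySem.Dict.get?]; omega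
  by_cases h14 : c = 14
  · subst h14; rw [Bool.eq_iff_iff]; simp [pvMem, pvTable_eq, PySem.Dict.contains_mk, PySem.Dict.getD, PySem.Dict.get?_mk_cons, PySem.Dict.get?]; omega
  by_cases h15 : c = 15
  · subst h15; rw [Bool.eq_iff_iff]; simp [pvMem, pvTable_eq, PySem.Dict.contains_mk, PySem.Dict.getD, PySem.Dict.get?_mk_cons, PySem.Dict.get?]; omega
  by_cases h16 : c = 16
  · subst h16; rw [Bool.eq_iff_iff]; simp [pvMem, pvTable_eq, PySem.Dict.contains_mk, PySem.Dict.getD, PySem.Dict.get?_mk_cons, PySem.Dict.get?]; omega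
  by_cases h17 : c = 17
  · subst h17; rw [Bool.eq_iff_iff]; simp [pvMem, pvTable_eq, PySem.Dict.contains_mk, PySem.Dict.getD, PySem.Dict.get?_mk_cons, PySem.Dict.get?]; omega
  · rw [Bool.eq_iff_iff]
    have hf : List.find? (fun p => p.1 == c) [((0:Int), ([0, 1, 2, 3, 4, 5, 6]:List Int)), (17, [0, 1, 2, 3, 4, 5]), (1, [1, 2, 3, 4, 5, 6]), (12, [1, 2, 3, 4, 5]), (13, [1, 2, 3, 4, 5]), (14, [1, 2, 3, 4, 5]), (15, [1, 2, 3, 4, 5]), (16, [1, 2, 3, 4, 5]), (2, [3, 4, 5, 6]), (3, [3, 4, 5]), (4, [3, 4, 5]), (5, [3, 4, 5]), (6, [3, 4, 5]), (7, [3, 4, 5]), (8, [3, 4, 5]), (9, [3, 4, 5]), (10, [3, 4, 5]), (11, [3, 4, 5])] = none := by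
      rw [List.find?_eq_none]
      intro a ha
      fin_cases ha <;> simp <;> omega
    simp [pvMem, pvTable_eq, PySem.Dict.contains_mk, PySem.Dict.getD, PySem.Dict.get?, hf]
    omega


-- loop characterisations of B's two helpers
theorem pvLastLtGo_ge (v : Int) : ∀ (L : List Int), (∀ x ∈ L, ¬ x < v) → ∀ b, pvLastLtGo L v b = b := by
  intro L
  induction L with
  | nil => intro _ b; rfl
  | cons x rest ih =>
    intro h b
    unfold pvLastLtGo
    rw [if_neg (h x (by simp))]

theorem pvLastLtGo_mem (v : Int) : ∀ (L : List Int), L.Pairwise (· < ·) → (v - 1) ∈ L → ∀ b, pvLastLtGo L v b = some (v - 1) := by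
  intro L
  induction L with
  | nil => intro _ h; simp at h
  | cons x rest ih =>
    intro hs hm b
    rcases List.pairwise_cons.mp hs with ⟨hlt, hs'⟩
    rcases List.mem_cons.mp hm with hx | hx
    · unfold pvLastLtGo
      rw [if_pos (by omega)]
      rw [pvLastLtGo_ge v rest (fun e he => by have := hlt e he; omega)]
      rw [hx]
    · have hxlt : x < v - 1 := hlt _ hx
      unfold pvLastLtGo
      rw [if_pos (by omega)]
      exact ih hs' hx (some x)

theorem pvLastLtGo_shift (v : Int) : ∀ (L : List Int), (v - 1) ∉ L → ∀ b, pvLastLtGo L v b = pvLastLtGo L (v - 1) b := by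
  intro L
  induction L with
  | nil => intro _ b; rfl
  | cons x rest ih =>
    intro hm b
    have hx : x ≠ v - 1 := fun h => hm (by simp [h])
    have hrest : (v - 1) ∉ rest := fun h => hm (List.mem_cons_of_mem _ h)
    by_cases h1 : x < v - 1
    · unfold pvLastLtGo
      rw [if_pos (by omega), if_pos h1]
      exact ih hrest (some x)
    · unfold pvLastLtGo
      rw [if_neg (by omega), if_neg h1]

theorem pvFirstGt_ge (v : Int) : ∀ (L : List Int), (∀ x ∈ L, ¬ x > v) → pvFirstGt L v = none := by
  intro L
  induction L with
  | nil => intro _; rfl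
  | cons x rest ih =>
    intro h
    unfold pvFirstGt
    rw [if_neg (h x (by simp))]
    exact ih (fun e he => h e (List.mem_cons_of_mem _ he))

theorem pvFirstGt_mem (v : Int) : ∀ (L : List Int), L.Pairwise (· < ·) → (v + 1) ∈ L → pvFirstGt L v = some (v + 1) := by
  intro L
  induction L with
  | nil => intro _ h; simp at h
  | cons x rest ih =>
    intro hs hm
    rcases List.pairwise_cons.mp hs with ⟨hlt, hs'⟩
    rcases List.mem_cons.mp hm with hx | hx
    · unfold pvFirstGt
      rw [if_pos (by omega), hx]
    · have hxlt : x < v + 1 := hlt _ hx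
      unfold pvFirstGt
      rw [if_neg (by omega)]
      exact ih hs' hx

theorem pvFirstGt_shift (v : Int) : ∀ (L : List Int), (v + 1) ∉ L → pvFirstGt L v = pvFirstGt L (v + 1) := by
  intro L
  induction L with
  | nil => intro _; rfl
  | cons x rest ih =>
    intro hm
    have hx : x ≠ v + 1 := fun h => hm (by simp [h])
    have hrest : (v + 1) ∉ rest := fun h => hm (List.mem_cons_of_mem _ h)
    by_cases h1 : x > v + 1
    · unfold pvFirstGt
      rw [if_pos (by omega), if_pos h1]
    · unfold pvFirstGt
      rw [if_neg (by omega), if_neg h1]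
      exact ih hrest

-- A's descending scan computes B's _last_lt
theorem pv_scan_down (p : Int → Bool) (L : List Int) (hp : ∀ x, p x = decide (x ∈ L)) (hs : L.Pairwise (· < ·)) (h0 : ∀ x ∈ L, 0 ≤ x) :
    ∀ (n : Nat) (c : Int), (c - 1 - (-1)).toNat = n → pvScan (-1) p (c - 1) n = pvLastLtGo L c none := by
  intro n
  induction n with
  | zero =>
    intro c hc
    rw [show pvScan (-1) p (c - 1) 0 = none from rfl]
    rw [pvLastLtGo_ge c L (fun x hx => by have := h0 x hx; omega)]
  | succ n ih =>
    intro c hc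
    unfold pvScan
    by_cases hmem : (c - 1) ∈ L
    · rw [hp, if_pos (by simpa using hmem)]
      rw [pvLastLtGo_mem c L hs hmem]
    · rw [hp, if_neg (by simpa using hmem)]
      rw [show c - 1 + -1 = (c - 1) - 1 by ring]
      rw [ih (c - 1) (by omega)]
      rw [pvLastLtGo_shift c L hmem]

-- A's ascending scan computes B's _first_gt
theorem pv_scan_up (M : Int) (p : Int → Bool) (L : List Int) (hp : ∀ x, p x = decide (x ∈ L)) (hs : L.Pairwise (· < ·)) (hub : ∀ x ∈ L, x ≤ M) :
    ∀ (n : Nat) (c : Int), (M + 1 - (c + 1)).toNat = n → pvScan 1 p (c + 1) n = pvFirstGt L c := by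
  intro n
  induction n with
  | zero =>
    intro c hc
    rw [show pvScan 1 p (c + 1) 0 = none from rfl]
    rw [pvFirstGt_ge c L (fun x hx => by have := hub x hx; omega)]
  | succ n ih =>
    intro c hc
    unfold pvScan
    by_cases hmem : (c + 1) ∈ L
    · rw [hp, if_pos (by simpa using hmem)]
      rw [pvFirstGt_mem c L hs hmem]
    · rw [hp, if_neg (by simpa using hmem)]
      rw [show c + 1 + 1 = (c + 1) + 1 by ring]
      rw [ih (c + 1) (by omega)]
      rw [pvFirstGt_shift c L hmem]

-- ===== VERDICT (by name: the statement is the Claim_ definition above) =====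
set_option maxRecDepth 40000 in
theorem handle_move_spec : Claim_equal_handle_move := by
  intro r c dir _
  unfold Spec_handle_move handle_move handle_move_alt
  by_cases h1 : dir = "left"
  · simp only [h1, if_pos rfl]
    rw [pv_scan_down (fun col => pvMem r col) (pvROW_COLS.getD r []) (pv_mem_row r) (pv_row_props r).1 (fun x hx => ((pv_row_props r).2 x hx).1) _ c rfl]
    rfl
  by_cases h2 : dir = "right"
  · simp only [h1, h2, if_neg, if_pos rfl, reduceIte]
    rw [pvMAX_COL_eq]
    rw [pv_scan_up 17 (fun col => pvMem r col) (pvROW_COLS.getD r []) (pv_mem_row r) (pv_row_props r).1 (fun x hx => ((pv_row_props r).2 x hx).2) _ c rfl]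
    rfl
  by_cases h3 : dir = "up"
  · simp only [h1, h2, h3, if_neg, if_pos rfl, reduceIte]
    rw [pv_scan_down (fun row => pvMem row c) (pvCOL_ROWS.getD c []) (pv_mem_col c) (pv_col_props c).1 (fun x hx => ((pv_col_props c).2 x hx).1) _ r rfl]
    rfl
  by_cases h4 : dir = "down"
  · simp only [h1, h2, h3, h4, if_neg, if_pos rfl, reduceIte]
    rw [pvMAX_ROW_eq]
    rw [pv_scan_up 6 (fun row => pvMem row c) (pvCOL_ROWS.getD c []) (pv_mem_col c) (pv_col_props c).1 (fun x hx => ((pv_col_props c).2 x hx).2) _ r rfl]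
    rfl
  · simp only [h1, h2, h3, h4, reduceIte]
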